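-- pv_equiv track=rewrite | github.com/multica-ai/multica | tools/multica_orchestrator_consumer.py | has_failed_validation_or_tests
-- ===== SOURCE A (Python) =====
-- def has_failed_validation_or_tests(text: str) -> bool:
--     failure_phrases = [
--         "validation failed",
--         "failed validation",
--         "tests failed",
--         "test failed",
--         "failed tests",
--         "failed test",
--         "unit tests failed",
--         "checks failed",
--         "check failed",
--         "build failed",
--     ]
--     negated_prefixes = ("no ", "no known ", "without ", "zero ")
--     for phrase in failure_phrases:
--         start = text.find(phrase)
--         while start != -1:
--             prefix = text[max(0, start - 20) : start]
--             if not prefix.endswith(negated_prefixes):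
--                 return True
--             start = text.find(phrase, start + 1)
--     return False
-- ===== SOURCE B (Python) =====
-- _PHRASES = [
--     "validation failed",
--     "failed validation",
--     "tests failed",
--     "test failed",
--     "failed tests",
--     "failed test",
--     "unit tests failed",
--     "checks failed",
--     "check failed",
--     "build failed",
-- ]
-- _NEGATED = ("no ", "no known ", "without ", "zero ")
--
--
-- def has_failed_validation_or_tests(text: str) -> bool:
--     # single position-major scan: a hit is any position where some phrase
--     # starts and the text before that position does not end in a negation
--     return any(
--         any(text.startswith(p, i) for p in _PHRASES)
--         and not text.endswith(_NEGATED, 0, i)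
--         for i in range(len(text))
--     )
-- ===== Notes on version B (the rewrite author's own statement) =====
-- stated objective: simpler
-- what changed: Replaced the phrase-major str.find/while skipping loops with a single position-major scan: one pass over text positions, checking at each position whether any phrase starts there and the preceding text does not end in a negation.
import Mathlib
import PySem

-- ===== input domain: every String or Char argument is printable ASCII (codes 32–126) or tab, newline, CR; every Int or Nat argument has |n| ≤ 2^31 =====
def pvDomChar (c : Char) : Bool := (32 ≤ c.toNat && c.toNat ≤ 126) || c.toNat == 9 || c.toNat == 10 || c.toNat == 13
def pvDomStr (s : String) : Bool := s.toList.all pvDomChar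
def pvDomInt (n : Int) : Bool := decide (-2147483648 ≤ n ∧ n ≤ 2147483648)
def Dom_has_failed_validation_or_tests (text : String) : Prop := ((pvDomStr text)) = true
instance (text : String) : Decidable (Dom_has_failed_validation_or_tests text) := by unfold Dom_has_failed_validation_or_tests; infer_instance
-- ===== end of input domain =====

-- B replaces A's phrase-major str.find/while loops by a single position-major
-- scan over the text (simpler decomposition; return value proved equal).

-- ===== PORT A =====
def pvFailurePhrasesA : List (List Char) :=
  ["validation failed".toList, "failed validation".toList, "tests failed".toList,
   "test failed".toList, "failed tests".toList, "failed test".toList,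
   "unit tests failed".toList, "checks failed".toList, "check failed".toList,
   "build failed".toList]

-- prefix.endswith(negated_prefixes): Python endswith on a tuple = any of the four
def pvEndsNegA (pre : List Char) : Bool :=
  PySem.Chars.endswith pre "no ".toList || PySem.Chars.endswith pre "no known ".toList ||
  PySem.Chars.endswith pre "without ".toList || PySem.Chars.endswith pre "zero ".toList

-- the 'while start != -1' loop; fuel len(text)+1 suffices (start strictly increases)
def pvWhileA (s p : List Char) : Nat → Int → Bool
  | 0, _ => false
  | fuel + 1, start =>
    if start ≠ -1 then
      let pre := PySem.List.slice s (some (max 0 (start - 20))) (some start)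
      if ! pvEndsNegA pre then true
      else pvWhileA s p fuel (PySem.Chars.findFrom s p (start + 1) none)
    else false

def has_failed_validation_or_tests (text : String) : Bool :=
  let s := text.toList
  pvFailurePhrasesA.any (fun p => pvWhileA s p (s.length + 1) (PySem.Chars.find s p))

-- ===== PORT B =====
def pvFailurePhrasesB : List (List Char) :=
  ["validation failed".toList, "failed validation".toList, "tests failed".toList,
   "test failed".toList, "failed tests".toList, "failed test".toList,
   "unit tests failed".toList, "checks failed".toList, "check failed".toList,
   "build failed".toList]

-- text.endswith(_NEGATED, 0, i): endswith over the first i characters, i.e. List.take i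
-- (exact: here i is a Nat with i <= len, so the 0..i bounds clamp to take i)
def pvNegatedB (s : List Char) (i : Nat) : Bool :=
  PySem.Chars.endswith (s.take i) "no ".toList || PySem.Chars.endswith (s.take i) "no known ".toList ||
  PySem.Chars.endswith (s.take i) "without ".toList || PySem.Chars.endswith (s.take i) "zero ".toList

def has_failed_validation_or_tests_alt (text : String) : Bool :=
  let s := text.toList
  (List.range s.length).any fun i =>
    -- text.startswith(p, i) = p matches at position i, i.e. startswith on List.drop i (exact for 0 <= i < len)
    (pvFailurePhrasesB.any fun p => PySem.Chars.startswith (List.drop i s) p) && ! pvNegatedB s i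

-- ===== PRECONDITION & SPEC =====
def Spec_has_failed_validation_or_tests (text : String) (out : Bool) : Prop := out = has_failed_validation_or_tests_alt text
instance (text : String) (out : Bool) : Decidable (Spec_has_failed_validation_or_tests text out) := by unfold Spec_has_failed_validation_or_tests; infer_instance

-- ===== CLAIM (what is proved, stated in full; the proofs are below) =====
def Claim_equal_has_failed_validation_or_tests : Prop := ∀ (text : String), Dom_has_failed_validation_or_tests text → Spec_has_failed_validation_or_tests text (has_failed_validation_or_tests text)

-- ===== LEMMAS AND PROOFS =====

-- endswith only looks at the last |q| characters: dropping a guarded amount in front keeps it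
lemma pv_endswith_drop (l q : List Char) (m : Nat) (h : q.length + m ≤ l.length) :
    PySem.Chars.endswith (l.drop m) q = PySem.Chars.endswith l q := by
  apply Bool.eq_iff_iff.mpr
  rw [PySem.Chars.endswith_iff, PySem.Chars.endswith_iff]
  constructor
  · intro hs; exact hs.trans (List.drop_suffix m l)
  · rintro ⟨t, rfl⟩
    have hm : m ≤ t.length := by simp [List.length_append] at h; omega
    exact ⟨t.drop m, by rw [List.drop_append_of_le_length hm]⟩

-- nonempty prefix of a drop forces the index below the length
lemma pv_lt_of_prefix (s p : List Char) (i : Nat) (hp : p ≠ []) (hpre : p <+: s.drop i) :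
    i < s.length := by
  by_contra hle
  rw [List.drop_eq_nil_of_le (by omega)] at hpre
  exact hp (List.prefix_nil.mp hpre)

-- the 20-char window A slices equals B's full prefix as far as the four candidates see
lemma pv_neg_window_eq (s : List Char) (i : Nat) (hi : i ≤ s.length) :
    pvEndsNegA (PySem.List.slice s (some (max 0 ((i : Int) - 20))) (some (i : Int))) = pvNegatedB s i := by
  have hmax : max 0 ((i : Int) - 20) = ((i - 20 : Nat) : Int) := by omega
  have hwin : PySem.List.slice s (some (max 0 ((i : Int) - 20))) (some (i : Int))
      = (s.take i).drop (i - 20) := by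
    rw [hmax, PySem.List.slice_natCast, List.take_drop,
      show (i - 20) + (i - (i - 20)) = i from by omega]
  rw [hwin]
  by_cases h20 : i ≤ 20
  · have h0 : i - 20 = 0 := by omega
    simp [pvEndsNegA, pvNegatedB, h0]
  · have hlen : (s.take i).length = i := by rw [List.length_take]; omega
    unfold pvEndsNegA pvNegatedB
    rw [pv_endswith_drop _ _ _ (by rw [hlen, show ("no ".toList).length = 3 from rfl]; omega),
        pv_endswith_drop _ _ _ (by rw [hlen, show ("no known ".toList).length = 9 from rfl]; omega),
        pv_endswith_drop _ _ _ (by rw [hlen, show ("without ".toList).length = 8 from rfl]; omega),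
        pv_endswith_drop _ _ _ (by rw [hlen, show ("zero ".toList).length = 5 from rfl]; omega)]

-- the while loop over find-occurrences succeeds iff some occurrence at index ≥ k is unnegated
lemma pv_whileA_iff (s p : List Char) (hp : p ≠ []) :
    ∀ fuel k, k ≤ s.length → s.length + 1 - k ≤ fuel →
      (pvWhileA s p fuel (PySem.Chars.findFrom s p (k : Int) none) = true ↔
        ∃ i, k ≤ i ∧ p <+: s.drop i ∧ pvNegatedB s i = false) := by
  intro fuel
  induction fuel with
  | zero => intro k hk hf; omega
  | succ fuel ih =>
    intro k hk hf
    by_cases hfind : PySem.Chars.findFrom s p (k : Int) = -1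
    · have hno : ¬ p <:+: s.drop k := (PySem.Chars.findFrom_natCast_eq_neg_one_iff s p k hk).mp hfind
      rw [hfind]
      simp only [pvWhileA, if_neg (by norm_num : ¬ ((-1 : Int) ≠ -1))]
      constructor
      · intro h; exact absurd h (by simp)
      · rintro ⟨i, hki, hpre, -⟩
        exfalso
        apply hno
        have hdd : s.drop i = (s.drop k).drop (i - k) := by rw [List.drop_drop]; congr 1; omega
        rw [hdd] at hpre
        exact hpre.isInfix.trans (List.drop_suffix (i - k) (s.drop k)).isInfix
    · obtain ⟨hge, hpre, hmin⟩ := PySem.Chars.findFrom_natCast_spec s p k hk hfind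
      set f := PySem.Chars.findFrom s p (k : Int) with hfdef
      have hf0 : 0 ≤ f := le_trans (by exact_mod_cast Nat.zero_le k) hge
      set j := f.toNat with hjdef
      have hj : f = (j : Int) := by omega
      have hjk : k ≤ j := by omega
      have hjn : j < s.length := pv_lt_of_prefix s p j hp hpre
      rw [hj]
      simp only [pvWhileA, if_pos (by omega : ((j : Int)) ≠ -1)]
      rw [pv_neg_window_eq s j (by omega)]
      by_cases hneg : pvNegatedB s j = false
      · simp only [hneg, Bool.not_false]
        constructor
        · intro _; exact ⟨j, hjk, hpre, hneg⟩
        · intro _; rfl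
      · have hnegT : pvNegatedB s j = true := by
          cases h : pvNegatedB s j
          · exact absurd h hneg
          · rfl
        simp only [hnegT, Bool.not_true]
        rw [if_neg Bool.false_ne_true]
        have hcast : (j : Int) + 1 = ((j + 1 : Nat) : Int) := by push_cast; ring
        rw [hcast]
        rw [ih (j + 1) (by omega) (by omega)]
        constructor
        · rintro ⟨i, hi1, hi2, hi3⟩; exact ⟨i, by omega, hi2, hi3⟩
        · rintro ⟨i, hi1, hi2, hi3⟩
          refine ⟨i, ?_, hi2, hi3⟩
          by_contra hlt
          rcases Nat.lt_or_ge i j with hij | hij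
          · exact hmin i hi1 (by omega) hi2
          · have : i = j := by omega
            rw [this] at hi3
            rw [hi3] at hnegT
            exact Bool.false_ne_true hnegT

-- every failure phrase is nonempty
lemma pv_phrases_ne_nil : ∀ q ∈ pvFailurePhrasesA, q ≠ [] := by decide

-- the two scans find the same thing: some unnegated occurrence of some phrase
lemma pv_main (s : List Char) :
    (pvFailurePhrasesA.any fun p => pvWhileA s p (s.length + 1) (PySem.Chars.find s p)) =
      ((List.range s.length).any fun i =>
        (pvFailurePhrasesB.any fun p => PySem.Chars.startswith (List.drop i s) p) && ! pvNegatedB s i) := by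
  have hBA : pvFailurePhrasesB = pvFailurePhrasesA := rfl
  apply Bool.eq_iff_iff.mpr
  rw [List.any_eq_true, List.any_eq_true]
  constructor
  · rintro ⟨p, hpmem, hrun⟩
    have hp : p ≠ [] := pv_phrases_ne_nil p hpmem
    rw [← PySem.Chars.findFrom_zero s p, show (0 : Int) = ((0 : Nat) : Int) from rfl] at hrun
    obtain ⟨i, -, hpre, hneg⟩ :=
      (pv_whileA_iff s p hp (s.length + 1) 0 (by omega) (by omega)).mp hrun
    refine ⟨i, List.mem_range.mpr (pv_lt_of_prefix s p i hp hpre), ?_⟩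
    simp only [Bool.and_eq_true, Bool.not_eq_eq_eq_not, Bool.not_true, List.any_eq_true, hBA]
    exact ⟨⟨p, hpmem, (PySem.Chars.startswith_iff _ _).mpr hpre⟩, hneg⟩
  · rintro ⟨i, -, hgood⟩
    simp only [Bool.and_eq_true, Bool.not_eq_eq_eq_not, Bool.not_true, List.any_eq_true, hBA] at hgood
    obtain ⟨⟨p, hpmem, hsw⟩, hneg⟩ := hgood
    have hp : p ≠ [] := pv_phrases_ne_nil p hpmem
    refine ⟨p, hpmem, ?_⟩
    rw [← PySem.Chars.findFrom_zero s p, show (0 : Int) = ((0 : Nat) : Int) from rfl]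
    exact (pv_whileA_iff s p hp (s.length + 1) 0 (by omega) (by omega)).mpr
      ⟨i, Nat.zero_le i, (PySem.Chars.startswith_iff _ _).mp hsw, hneg⟩

-- ===== VERDICT (by name: the statement is the Claim_ definition above) =====
theorem has_failed_validation_or_tests_spec : Claim_equal_has_failed_validation_or_tests := by
  intro text _
  unfold Spec_has_failed_validation_or_tests has_failed_validation_or_tests has_failed_validation_or_tests_alt
  exact pv_main text.toList
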